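-- pv_equiv track=rewrite | github.com/pypi-data/pypi-mirror-403 | packages/pttechnologies/pttechnologies-0.0.34.tar.gz/pttechnologies-0.0.34/pttechnologies/modules/submodules/phpmyadmin.py | _deduplicate_components
-- ===== SOURCE A (Python) =====
-- from typing import Dict, Any, List, Optional
--
-- def _deduplicate_components(components: List[Dict[str, Any]]) -> List[Dict[str, Any]]:
--     """
--     Deduplicate detected components, preferring more reliable sources.
--
--     Args:
--         components: List of detected technology components
--
--     Returns:
--         Deduplicated list with priority handling
--     """
--     unique = {}
--     source_priority = {'title': 4, 'nav_item': 3, 'footer': 2, 'h1': 1}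
--
--     for component in components:
--         tech_key = component['technology'].lower()
--
--         if tech_key not in unique:
--             unique[tech_key] = component
--         else:
--             existing_priority = source_priority.get(unique[tech_key].get('source', ''), 0)
--             new_priority = source_priority.get(component.get('source', ''), 0)
--
--             if new_priority > existing_priority:
--                 unique[tech_key] = component
--             elif new_priority == existing_priority and component.get('version') and not unique[tech_key].get('version'):
--                 unique[tech_key] = component
--
--     return list(unique.values())
-- ===== SOURCE B (Python) =====
-- from typing import Dict, Any, List
--
-- def _deduplicate_components(components: List[Dict[str, Any]]) -> List[Dict[str, Any]]:
--     """Group components by lower-cased technology, then keep each group's best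
--     component: highest source priority, then presence of a version, earliest wins."""
--     source_priority = {'title': 4, 'nav_item': 3, 'footer': 2, 'h1': 1}
--     grouped = {}
--     for component in components:
--         grouped.setdefault(component['technology'].lower(), []).append(component)
--     return [
--         max(group, key=lambda c: (source_priority.get(c.get('source', ''), 0),
--                                   bool(c.get('version'))))
--         for group in grouped.values()
--     ]
-- ===== Notes on version B (the rewrite author's own statement) =====
-- stated objective: idiomatic
-- what changed: Replaces A's incremental keep-or-replace dict update (explicit priority/version comparison against the stored entry) by an ordered group-by-technology dict followed by max() per group with a (priority, has-version) tuple key, relying on max's first-maximal rule for the earliest-wins tie-break.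
import Mathlib
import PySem

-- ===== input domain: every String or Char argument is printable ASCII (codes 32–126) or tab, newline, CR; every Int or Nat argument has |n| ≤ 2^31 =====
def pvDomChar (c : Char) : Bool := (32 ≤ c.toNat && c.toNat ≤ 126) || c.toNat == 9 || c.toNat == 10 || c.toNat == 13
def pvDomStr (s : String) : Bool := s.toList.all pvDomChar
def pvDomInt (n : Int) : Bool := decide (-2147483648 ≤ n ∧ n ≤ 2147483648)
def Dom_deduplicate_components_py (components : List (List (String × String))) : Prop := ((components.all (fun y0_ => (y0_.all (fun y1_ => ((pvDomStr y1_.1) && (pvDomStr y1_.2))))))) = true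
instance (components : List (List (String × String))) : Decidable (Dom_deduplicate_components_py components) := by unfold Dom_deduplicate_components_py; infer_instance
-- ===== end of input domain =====

-- B groups the components by lower-cased technology into an ordered dict of lists and then
-- takes each group's max under the (source-priority, has-version) key; same return value as A.

-- ===== PORT A =====
-- shared key helpers: both Python versions compute component['technology'].lower(),
-- source_priority.get(component.get('source',''), 0) and bool(component.get('version'))
def pvTech (c : List (String × String)) : String :=
  PySem.Str.lower ((PySem.Dict.mk c).getD "technology" "")

def pvPrio (c : List (String × String)) : Int :=
  (PySem.Dict.ofList [("title", (4:Int)), ("nav_item", 3), ("footer", 2), ("h1", 1)]).getD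
    ((PySem.Dict.mk c).getD "source" "") 0

def pvHasVer (c : List (String × String)) : Bool :=
  !((PySem.Dict.mk c).getD "version" "" == "")

-- one iteration of A's for-loop over `unique`
def pvStepA (u : PySem.Dict String (List (String × String))) (c : List (String × String)) :
    PySem.Dict String (List (String × String)) :=
  match u.get? (pvTech c) with
  | none => u.insert (pvTech c) c
  | some ex =>
    if pvPrio c > pvPrio ex then u.insert (pvTech c) c
    else if pvPrio c == pvPrio ex && pvHasVer c && !pvHasVer ex then u.insert (pvTech c) c
    else u

def deduplicate_components_py (components : List (List (String × String))) :
    List (List (String × String)) :=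
  (components.foldl pvStepA PySem.Dict.empty).values

-- ===== PORT B =====
def deduplicate_components_py_alt (components : List (List (String × String))) :
    List (List (String × String)) :=
  ((components.foldl (fun g c => g.modify (pvTech c) [] (fun grp => grp ++ [c]))
      PySem.Dict.empty).values).map
    (fun grp => (PySem.List.max2? grp pvPrio pvHasVer).getD [])

-- ===== PRECONDITION & SPEC =====
-- Pre_ excludes exactly the inputs where some component lacks the 'technology' key,
-- on which the Python A raises KeyError.
def Pre_deduplicate_components_py (components : List (List (String × String))) : Prop :=
  ∀ c ∈ components, (PySem.Dict.mk c).contains "technology" = true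
instance (components : List (List (String × String))) : Decidable (Pre_deduplicate_components_py components) := by unfold Pre_deduplicate_components_py; infer_instance

def pvWitness_deduplicate_components_py : (List (List (String × String))) :=
  [[("technology", "PhpMyAdmin"), ("source", "title")], [("technology", "phpmyadmin"), ("version", "5.2")]]

def Spec_deduplicate_components_py (components : List (List (String × String))) (out : List (List (String × String))) : Prop := out = deduplicate_components_py_alt components
instance (components : List (List (String × String))) (out : List (List (String × String))) : Decidable (Spec_deduplicate_components_py components out) := by unfold Spec_deduplicate_components_py; infer_instance

-- ===== CLAIM (what is proved, stated in full; the proofs are below) =====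
def Claim_equal_deduplicate_components_py : Prop := ∀ (components : List (List (String × String))), Dom_deduplicate_components_py components → Pre_deduplicate_components_py components → Spec_deduplicate_components_py components (deduplicate_components_py components)

-- ===== LEMMAS AND PROOFS =====

-- the Option-level step shared by A's per-key update and max2?'s fold
def pvOStep (acc : Option (List (String × String))) (c : List (String × String)) :
    Option (List (String × String)) :=
  match acc with
  | none => some c
  | some m =>
    if (decide (pvPrio m < pvPrio c) || !decide (pvPrio c < pvPrio m) && decide (pvHasVer m < pvHasVer c)) = true
    then some c else some m

theorem pvMax2_eq_foldl (xs : List (List (String × String))) :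
    PySem.List.max2? xs pvPrio pvHasVer = xs.foldl pvOStep none := by
  rw [PySem.List.max2?]
  apply List.foldl_ext
  intro acc x _
  cases acc <;> rfl

theorem pvContains_keys (d : PySem.Dict String (List (String × String))) (k : String) :
    PySem.Set.contains d.keys k = d.contains k := by
  simp only [PySem.Set.contains, PySem.Dict.keys, PySem.Dict.contains,
    List.contains_eq_any_beq, List.any_map]
  simp [Function.comp_def, BEq.comm]

theorem pvKeys_insert (d : PySem.Dict String (List (String × String))) (k : String)
    (v : List (String × String)) : (d.insert k v).keys = PySem.Set.add d.keys k := by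
  simp only [PySem.Dict.insert, PySem.Set.add, pvContains_keys]
  split
  · simp only [PySem.Dict.keys, List.map_map, Function.comp_def]
    apply List.map_congr_left
    intro p _
    by_cases hp : p.1 = k
    · simp [hp]
    · simp [hp]
  · simp [PySem.Dict.keys]

theorem pvStepA_keys (u : PySem.Dict String (List (String × String)))
    (c : List (String × String)) : (pvStepA u c).keys = PySem.Set.add u.keys (pvTech c) := by
  unfold pvStepA
  split
  · exact pvKeys_insert u _ c
  · next ex h =>
    have hc : u.contains (pvTech c) = true := by
      rcases hh : u.contains (pvTech c)
      · rw [(PySem.Dict.get?_eq_none_iff_contains u (pvTech c)).mpr hh] at h; cases h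
      · rfl
    have hadd : PySem.Set.add u.keys (pvTech c) = u.keys := by
      simp only [PySem.Set.add, pvContains_keys, hc, if_pos]
    split_ifs
    · rw [pvKeys_insert]
    · rw [pvKeys_insert]
    · exact hadd.symm

theorem pvStepA_get?_ne (u : PySem.Dict String (List (String × String)))
    (c : List (String × String)) (k : String) (hne : k ≠ pvTech c) :
    (pvStepA u c).get? k = u.get? k := by
  unfold pvStepA
  split
  · rw [PySem.Dict.get?_insert, if_neg hne]
  · split_ifs
    · rw [PySem.Dict.get?_insert, if_neg hne]
    · rw [PySem.Dict.get?_insert, if_neg hne]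
    · rfl

theorem pvStepA_get?_self (u : PySem.Dict String (List (String × String)))
    (c : List (String × String)) :
    (pvStepA u c).get? (pvTech c) = pvOStep (u.get? (pvTech c)) c := by
  unfold pvStepA pvOStep
  split
  · rw [PySem.Dict.get?_insert, if_pos rfl]
  · next ex h =>
    cases hve : pvHasVer ex <;> cases hvc : pvHasVer c <;>
      split_ifs with h1 h2 <;>
      simp_all [Bool.lt_iff, beq_iff_eq] <;> (exfalso; omega)

theorem pvFoldA_get? (l : List (List (String × String)))
    (u : PySem.Dict String (List (String × String))) (k : String) :
    (l.foldl pvStepA u).get? k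
      = (l.filter (fun c => pvTech c == k)).foldl pvOStep (u.get? k) := by
  induction l generalizing u with
  | nil => rfl
  | cons c t ih =>
    by_cases hk : pvTech c = k
    · subst hk
      rw [List.foldl_cons, ih, pvStepA_get?_self,
        List.filter_cons_of_pos (by simp), List.foldl_cons]
    · rw [List.foldl_cons, ih, pvStepA_get?_ne _ _ _ (fun h => hk h.symm),
        List.filter_cons_of_neg (by simp [hk])]

theorem pvFoldA_keys (l : List (List (String × String)))
    (u : PySem.Dict String (List (String × String))) :
    (l.foldl pvStepA u).keys = PySem.Set.update u.keys (l.map pvTech) := by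
  induction l generalizing u with
  | nil => rfl
  | cons c t ih =>
    simp only [List.foldl_cons, List.map_cons, PySem.Set.update, ih, pvStepA_keys]

theorem pvFoldB_getD (l : List (List (String × String))) (k : String) :
    (l.foldl (fun g c => g.modify (pvTech c) [] (fun grp => grp ++ [c]))
        (PySem.Dict.empty : PySem.Dict String (List (List (String × String))))).getD k []
      = l.filter (fun c => pvTech c == k) := by
  have hmap : (l.foldl (fun g c => g.modify (pvTech c) [] (fun grp => grp ++ [c]))
        (PySem.Dict.empty : PySem.Dict String (List (List (String × String)))))
      = ((l.map (fun c => (pvTech c, c))).foldl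
          (fun d p => d.modify p.1 [] (fun x => x ++ [p.2])) PySem.Dict.empty) := by
    rw [List.foldl_map]
  rw [hmap, PySem.Dict.getD_foldl_modify_append, PySem.Dict.getD_empty]
  rw [List.filter_map, List.map_map]
  simp [Function.comp_def]

theorem pvFoldB_keys (l : List (List (String × String))) :
    (l.foldl (fun g c => g.modify (pvTech c) [] (fun grp => grp ++ [c]))
        (PySem.Dict.empty : PySem.Dict String (List (List (String × String))))).keys
      = PySem.Set.update [] (l.map pvTech) := by
  rw [PySem.Dict.keys_foldl_modify_key l pvTech [] (fun _ c => fun grp => grp ++ [c]),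
    PySem.Dict.keys_empty]

theorem pvNodup_update_nil (xs : List String) :
    (PySem.Set.update ([] : List String) xs).Nodup :=
  PySem.Set.nodup_ofList xs

-- ===== VERDICT (by name: the statement is the Claim_ definition above) =====
theorem deduplicate_components_py_spec : Claim_equal_deduplicate_components_py := by
  intro l _ _
  unfold Spec_deduplicate_components_py deduplicate_components_py deduplicate_components_py_alt
  have hkA := pvFoldA_keys l PySem.Dict.empty
  rw [PySem.Dict.keys_empty] at hkA
  have hkB := pvFoldB_keys l
  have hnd := pvNodup_update_nil (l.map pvTech)
  rw [PySem.Dict.values_eq_map_keys _ (hkA ▸ hnd) [],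
    PySem.Dict.values_eq_map_keys _ (hkB ▸ hnd) [],
    List.map_map, hkA, hkB]
  apply List.map_congr_left
  intro k _
  simp only [Function.comp_def]
  rw [PySem.Dict.getD_eq_get?_getD, pvFoldA_get?, PySem.Dict.get?_empty,
    pvFoldB_getD, pvMax2_eq_foldl]
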